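-- pv_equiv track=rewrite | github.com/nnkennard/mention_bottleneck | analysis/compare_mention_candidates.py | e2e_pred_set
-- ===== SOURCE A (Python) =====
-- def e2e_pred_set(tokens):
--
--   messy_counter = 0
--   for sentence in tokens:
--     for start in range(len(sentence)):
--       for end in range(start, len(sentence)):
--         if end - start < 30:
--           messy_counter += 1
--   return len(sum(tokens, [])) * 30, messy_counter
-- ===== SOURCE B (Python) =====
-- def e2e_pred_set(tokens):
--   total = 0
--   messy = 0
--   for sentence in tokens:
--     n = len(sentence)
--     total += n
--     if n <= 30:
--       messy += n * (n + 1) // 2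
--     else:
--       messy += 30 * n - 435
--   return total * 30, messy
-- ===== Notes on version B (the rewrite author's own statement) =====
-- stated objective: faster
-- what changed: Replaced the quadratic double loop over (start,end) pairs per sentence by the closed form min-sum (n*(n+1)//2 for n<=30, else 30*n-435), and accumulate the total token count in the same single pass instead of flattening all sentences with sum.
import Mathlib
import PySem

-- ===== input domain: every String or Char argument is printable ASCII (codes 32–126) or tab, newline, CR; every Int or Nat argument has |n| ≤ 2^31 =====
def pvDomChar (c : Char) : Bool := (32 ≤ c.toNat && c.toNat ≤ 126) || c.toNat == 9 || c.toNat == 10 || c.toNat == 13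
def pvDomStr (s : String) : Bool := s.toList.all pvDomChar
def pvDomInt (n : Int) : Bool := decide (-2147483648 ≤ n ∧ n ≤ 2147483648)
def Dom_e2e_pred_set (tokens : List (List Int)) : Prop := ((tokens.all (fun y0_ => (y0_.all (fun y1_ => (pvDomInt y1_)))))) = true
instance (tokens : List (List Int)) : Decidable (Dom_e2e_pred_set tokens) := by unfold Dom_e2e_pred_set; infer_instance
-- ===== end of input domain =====

-- B replaces A's quadratic per-sentence double loop by the closed-form count
-- (n*(n+1)//2 for n ≤ 30, else 30*n-435) and counts tokens in the same single pass;
-- measurably faster (asymptotic).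


-- ===== PORT A =====
def e2e_pred_set (tokens : List (List Int)) : Int × Int :=
  let messy := tokens.foldl (fun mc sentence =>
    (PySem.List.pyRange 0 (sentence.length : Int) 1).foldl (fun mc start =>
      (PySem.List.pyRange start (sentence.length : Int) 1).foldl (fun mc e =>
        if e - start < 30 then mc + 1 else mc) mc) mc) (0 : Int)
  (((tokens.foldl (fun acc s => acc ++ s) ([] : List Int)).length : Int) * 30, messy)

-- ===== PORT B =====
def e2e_pred_set_alt (tokens : List (List Int)) : Int × Int :=
  let p := tokens.foldl (fun (p : Int × Int) (sentence : List Int) =>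
    let n : Int := (sentence.length : Int)
    (p.1 + n, p.2 + (if n ≤ 30 then PySem.Int.floordiv (n * (n + 1)) 2 else 30 * n - 435))) ((0 : Int), (0 : Int))
  (p.1 * 30, p.2)

-- ===== PRECONDITION & SPEC =====
def Spec_e2e_pred_set (tokens : List (List Int)) (out : Int × Int) : Prop := out = e2e_pred_set_alt tokens
instance (tokens : List (List Int)) (out : Int × Int) : Decidable (Spec_e2e_pred_set tokens out) := by unfold Spec_e2e_pred_set; infer_instance

-- ===== CLAIM (what is proved, stated in full; the proofs are below) =====
def Claim_equal_e2e_pred_set : Prop := ∀ (tokens : List (List Int)), Dom_e2e_pred_set tokens → Spec_e2e_pred_set tokens (e2e_pred_set tokens)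

-- ===== LEMMAS AND PROOFS =====

theorem floordiv_two (a : Int) : PySem.Int.floordiv a 2 = a / 2 := by
  simp [PySem.Int.floordiv, Int.fdiv_eq_ediv_of_nonneg]

-- inner loop: for one start s, counts the ends e ∈ [s, n) with e - s < 30
theorem inner_count (s n : Int) (mc : Int) :
    (PySem.List.pyRange s n 1).foldl (fun mc e => if e - s < 30 then mc + 1 else mc) mc
      = mc + max 0 (min (n - s) 30) := by
  rw [PySem.List.foldl_ite_add_one]
  congr 1
  rw [PySem.List.pyRange_one, List.countP_map]
  have h : ((fun e : Int => decide (e - s < 30)) ∘ (fun k : Nat => s + (k : Int)))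
      = fun k : Nat => decide (k < 30) := by
    funext k
    simp only [Function.comp]
    have h2 : s + (k : Int) - s = (k : Int) := by ring
    rw [h2]; simp
  rw [h]
  have h3 : (List.range (n - s).toNat).countP (fun k => decide (k < 30)) = min (n - s).toNat 30 := by
    induction (n - s).toNat with
    | zero => simp
    | succ m ih => simp [List.range_succ, List.countP_append, ih]; split_ifs <;> omega
  rw [h3]; omega

-- per-sentence sum of the mins, as a function of the length
theorem sum_mins (m : Nat) :
    (((List.range m).map (fun k : Nat => max 0 (min ((m : Int) - k) 30))).sum : Int)
      = (if (m : Int) ≤ 30 then ((m : Int) * ((m : Int) + 1)) / 2 else 30 * (m : Int) - 435) := by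
  induction m with
  | zero => simp
  | succ m ih =>
    rw [List.range_succ_eq_map, List.map_cons, List.map_map, List.sum_cons]
    have hterms : ((fun k : Nat => max 0 (min (((m + 1 : Nat) : Int) - k) 30)) ∘ Nat.succ)
        = fun k : Nat => max 0 (min ((m : Int) - k) 30) := by
      funext k
      simp only [Function.comp, Nat.succ_eq_add_one]
      push_cast
      congr 1
      omega
    rw [hterms, ih]
    push_cast
    by_cases hm : m ≤ 29
    · have hev := Int.even_iff.mp (Int.even_mul_succ_self (m : Int))
      have hr : ((m : Int) + 1) * ((m : Int) + 1 + 1) = (m : Int) * ((m : Int) + 1) + 2 * ((m : Int) + 1) := by ring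
      have hm' : (m : Int) ≤ 29 := by exact_mod_cast hm
      rw [if_pos (by omega), if_pos (by omega)]
      omega
    · by_cases h30 : m = 30
      · subst h30; norm_num
      · have hm' : (31 : Int) ≤ (m : Int) := by exact_mod_cast (by omega : 31 ≤ m)
        rw [if_neg (by omega), if_neg (by omega)]
        omega

-- closed form for A's per-sentence double loop
theorem sentence_count (m : Nat) (mc : Int) :
    (PySem.List.pyRange 0 (m : Int) 1).foldl (fun mc start =>
      (PySem.List.pyRange start (m : Int) 1).foldl (fun mc e =>
        if e - start < 30 then mc + 1 else mc) mc) mc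
      = mc + (if (m : Int) ≤ 30 then PySem.Int.floordiv ((m : Int) * ((m : Int) + 1)) 2
              else 30 * (m : Int) - 435) := by
  have h1 : ∀ (acc : Int), ∀ start ∈ PySem.List.pyRange 0 (m : Int) 1,
      (PySem.List.pyRange start (m : Int) 1).foldl (fun mc e =>
        if e - start < 30 then mc + 1 else mc) acc
      = acc + max 0 (min ((m : Int) - start) 30) := fun acc start _ => inner_count start m acc
  refine (PySem.List.foldl_congr_mem _ _ _ _ h1).trans ?_
  rw [PySem.List.foldl_add, PySem.List.pyRange_one, List.map_map]
  have hc : ((fun start : Int => max 0 (min ((m : Int) - start) 30)) ∘ (fun k : Nat => 0 + (k : Int)))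
      = fun k : Nat => max 0 (min ((m : Int) - k) 30) := by
    funext k; simp
  rw [hc]
  have hm0 : ((m : Int) - 0).toNat = m := by omega
  rw [hm0, sum_mins, floordiv_two]

-- ===== VERDICT (by name: the statement is the Claim_ definition above) =====
theorem e2e_pred_set_spec : Claim_equal_e2e_pred_set := by
  intro tokens _
  unfold Spec_e2e_pred_set e2e_pred_set e2e_pred_set_alt
  rw [PySem.List.foldl_prod_mk (f := fun acc (s : List Int) => acc + (s.length : Int))
    (g := fun acc (s : List Int) => acc + (if (s.length : Int) ≤ 30
      then PySem.Int.floordiv ((s.length : Int) * ((s.length : Int) + 1)) 2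
      else 30 * (s.length : Int) - 435))]
  refine Prod.ext ?_ ?_
  · -- first components: total token count, times 30
    show ((tokens.foldl (fun acc s => acc ++ s) ([] : List Int)).length : Int) * 30
        = (tokens.foldl (fun acc (s : List Int) => acc + (s.length : Int)) 0) * 30
    rw [PySem.List.foldl_append_eq_flatten, PySem.List.foldl_add]
    rw [List.nil_append, List.length_flatten]
    push_cast
    simp [Function.comp_def]
  · -- second components: the bounded-span counts
    show tokens.foldl (fun mc (sentence : List Int) =>
        (PySem.List.pyRange 0 (sentence.length : Int) 1).foldl (fun mc start =>
          (PySem.List.pyRange start (sentence.length : Int) 1).foldl (fun mc e =>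
            if e - start < 30 then mc + 1 else mc) mc) mc) (0 : Int)
      = tokens.foldl (fun acc (s : List Int) => acc + (if (s.length : Int) ≤ 30
          then PySem.Int.floordiv ((s.length : Int) * ((s.length : Int) + 1)) 2
          else 30 * (s.length : Int) - 435)) 0
    exact PySem.List.foldl_congr_mem _ _ _ _ (fun acc s _ => sentence_count s.length acc)
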